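-- pv_equiv track=rewrite | github.com/mhagger/cvs2svn | cvs2svn_lib/dumpfile_delegate.py | generate_ignores
-- ===== SOURCE A (Python) =====
-- def generate_ignores(raw_ignore_val):
--   ignore_vals = [ ]
--   for ignore in raw_ignore_val.split():
--     # Reset the list if we encounter a '!'
--     # See http://cvsbook.red-bean.com/cvsbook.html#cvsignore
--     if ignore == '!':
--       ignore_vals = [ ]
--     else:
--       ignore_vals.append(ignore)
--   return ignore_vals
-- ===== SOURCE B (Python) =====
-- def generate_ignores(raw_ignore_val):
--   # Since each '!' resets the list, the result is exactly the tokens after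
--   # the LAST '!': walk the tokens backward, collecting until a '!' is seen.
--   tokens = raw_ignore_val.split()
--   out = []
--   for t in reversed(tokens):
--     if t == '!':
--       break
--     out.append(t)
--   out.reverse()
--   return out
-- ===== Notes on version B (the rewrite author's own statement) =====
-- stated objective: alternative
-- what changed: Replaces forward accumulation with reset-on-'!' by a backward scan over the split tokens that collects until the first '!' seen from the end, then reverses once.
import Mathlib
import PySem

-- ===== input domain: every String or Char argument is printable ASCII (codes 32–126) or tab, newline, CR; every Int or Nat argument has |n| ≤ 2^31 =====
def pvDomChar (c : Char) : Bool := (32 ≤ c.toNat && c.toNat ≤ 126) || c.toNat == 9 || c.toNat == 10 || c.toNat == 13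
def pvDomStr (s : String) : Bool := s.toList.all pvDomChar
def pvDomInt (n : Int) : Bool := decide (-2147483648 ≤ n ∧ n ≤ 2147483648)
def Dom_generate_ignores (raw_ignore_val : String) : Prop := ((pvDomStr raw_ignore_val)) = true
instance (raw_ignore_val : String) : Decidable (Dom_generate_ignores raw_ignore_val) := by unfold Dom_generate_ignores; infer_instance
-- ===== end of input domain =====

-- B changes the decomposition only (backward scan instead of forward reset); same cost.

-- ===== PORT A =====
-- forward accumulation, resetting on '!'
def generate_ignores (raw_ignore_val : String) : List String :=
  (PySem.Str.split₀ raw_ignore_val).foldl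
    (fun ignore_vals ignore => if ignore == "!" then [] else ignore_vals ++ [ignore]) []

-- ===== PORT B =====
-- Source B's loop: walk reversed tokens, append until a '!' is seen (break keeps acc)
def gi_back (out : List String) : List String → List String
  | [] => out
  | t :: rest => if t == "!" then out else gi_back (out ++ [t]) rest

def generate_ignores_alt (raw_ignore_val : String) : List String :=
  let tokens := PySem.Str.split₀ raw_ignore_val
  (gi_back [] tokens.reverse).reverse

-- ===== PRECONDITION & SPEC =====
def Spec_generate_ignores (raw_ignore_val : String) (out : List String) : Prop := out = generate_ignores_alt raw_ignore_val
instance (raw_ignore_val : String) (out : List String) : Decidable (Spec_generate_ignores raw_ignore_val out) := by unfold Spec_generate_ignores; infer_instance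

-- ===== CLAIM (what is proved, stated in full; the proofs are below) =====
def Claim_equal_generate_ignores : Prop := ∀ (raw_ignore_val : String), Dom_generate_ignores raw_ignore_val → Spec_generate_ignores raw_ignore_val (generate_ignores raw_ignore_val)

-- ===== LEMMAS AND PROOFS =====

theorem gi_back_acc (l : List String) : ∀ (acc : List String),
    gi_back acc l = acc ++ gi_back [] l := by
  induction l with
  | nil => intro acc; simp [gi_back]
  | cons t rest ih =>
    intro acc
    by_cases h : t = "!"
    · simp [gi_back, h]
    · simp [gi_back, h, ih [t], ih (acc ++ [t])]

theorem fold_eq_back (l : List String) :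
    l.foldl (fun ignore_vals ignore => if ignore == "!" then [] else ignore_vals ++ [ignore]) []
      = (gi_back [] l.reverse).reverse := by
  induction l using List.reverseRecOn with
  | nil => simp [gi_back]
  | append_singleton l t ih =>
    by_cases h : t = "!"
    · simp [h, gi_back]
    · rw [List.foldl_concat, ih]
      simp only [List.reverse_append, List.reverse_singleton, List.singleton_append, gi_back,
        beq_iff_eq, h, if_false]
      rw [show ([] ++ [t] : List String) = [t] from rfl, gi_back_acc l.reverse [t]]
      simp

-- ===== VERDICT (by name: the statement is the Claim_ definition above) =====
theorem generate_ignores_spec : Claim_equal_generate_ignores := by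
  intro raw _
  unfold Spec_generate_ignores generate_ignores generate_ignores_alt
  exact fold_eq_back _
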